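-- pv_equiv track=rewrite | github.com/seungsu3579/Algorithm_Study | kakao_blind_2020/kakao_test.py | truck_move_plan
-- ===== SOURCE A (Python) =====
-- def truck_move_plan(src, dst):
--     v = dst - src
--     x = v // 5
--     y = v % 5
--     for i in range(src + 1, src+y+1, 1 if src+y > src else -1):
--         if i % 5 == 0:
--             x += 1
--             y += -5
--
--     plan = []
--     for i in range(abs(x)):
--         if x > 0:
--             plan.append(2)
--         else:
--             plan.append(4)
--     for i in range(abs(y)):
--         if y > 0:
--             plan.append(1)
--         else:
--             plan.append(3)
--
--     return plan
-- ===== SOURCE B (Python) =====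
-- def truck_move_plan(src, dst):
--     v = dst - src
--     x, y = v // 5, v % 5
--     # closed-form: the window (src, src+y] contains a multiple of 5 iff the
--     # smallest multiple of 5 strictly above src is at most src+y
--     if (src // 5 + 1) * 5 <= src + y:
--         x += 1
--         y -= 5
--     return ([2] * x if x > 0 else [4] * (-x)) + ([1] * y if y > 0 else [3] * (-y))
-- ===== Notes on version B (the rewrite author's own statement) =====
-- stated objective: simpler
-- what changed: The correction loop scanning range(src+1, src+y+1) for a multiple of 5 is replaced by a single closed-form test (src//5+1)*5 <= src+y, and the two append loops are replaced by list replication/concatenation.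
import Mathlib
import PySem

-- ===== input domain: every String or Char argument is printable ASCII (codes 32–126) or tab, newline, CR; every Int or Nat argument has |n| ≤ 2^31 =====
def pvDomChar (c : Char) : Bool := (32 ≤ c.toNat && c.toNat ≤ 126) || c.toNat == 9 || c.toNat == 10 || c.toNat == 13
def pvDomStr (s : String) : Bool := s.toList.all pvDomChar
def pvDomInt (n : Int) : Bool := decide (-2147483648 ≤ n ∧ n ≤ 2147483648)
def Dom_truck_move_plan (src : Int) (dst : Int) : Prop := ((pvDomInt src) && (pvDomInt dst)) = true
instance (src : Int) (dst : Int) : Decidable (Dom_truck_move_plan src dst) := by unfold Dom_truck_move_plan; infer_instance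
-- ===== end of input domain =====

-- B replaces A's correction loop by a closed-form cross-of-5 test and builds the plan by list replication instead of append loops (objective: simpler).

-- ===== PORT A =====
def truck_move_plan (src : Int) (dst : Int) : List Int :=
  let v := dst - src
  let x := PySem.Int.floordiv v 5
  let y := PySem.Int.mod v 5
  let xy := (PySem.List.pyRange (src + 1) (src + y + 1) (if src + y > src then 1 else -1)).foldl
      (fun (p : Int × Int) i => if PySem.Int.mod i 5 == 0 then (p.1 + 1, p.2 + (-5)) else p) (x, y)
  let x := xy.1
  let y := xy.2
  let plan : List Int := []
  let plan := (PySem.List.pyRange 0 |x| 1).foldl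
      (fun plan _ => if x > 0 then plan ++ [2] else plan ++ [4]) plan
  let plan := (PySem.List.pyRange 0 |y| 1).foldl
      (fun plan _ => if y > 0 then plan ++ [1] else plan ++ [3]) plan
  plan

-- ===== PORT B =====
def truck_move_plan_alt (src : Int) (dst : Int) : List Int :=
  let v := dst - src
  let x := PySem.Int.floordiv v 5
  let y := PySem.Int.mod v 5
  let xy := if (PySem.Int.floordiv src 5 + 1) * 5 ≤ src + y then (x + 1, y - 5) else (x, y)
  let x := xy.1
  let y := xy.2
  (if x > 0 then List.replicate x.toNat 2 else List.replicate (-x).toNat 4) ++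
  (if y > 0 then List.replicate y.toNat 1 else List.replicate (-y).toNat 3)

-- ===== PRECONDITION & SPEC =====
def Spec_truck_move_plan (src : Int) (dst : Int) (out : List Int) : Prop := out = truck_move_plan_alt src dst
instance (src : Int) (dst : Int) (out : List Int) : Decidable (Spec_truck_move_plan src dst out) := by unfold Spec_truck_move_plan; infer_instance

-- ===== CLAIM (what is proved, stated in full; the proofs are below) =====
def Claim_equal_truck_move_plan : Prop := ∀ (src : Int) (dst : Int), Dom_truck_move_plan src dst → Spec_truck_move_plan src dst (truck_move_plan src dst)

-- ===== LEMMAS AND PROOFS =====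

-- range(src+1, src+y+1, 1) for 0 < y is the window [src+1, …, src+y].
lemma pyRange_window (src y : Int) (hy : 0 < y) :
    PySem.List.pyRange (src+1) (src+y+1) 1 = (List.range y.toNat).map (fun (k : Nat) => src + 1 + (k : Int)) := by
  simp only [PySem.List.pyRange]
  rw [if_neg (by norm_num), if_pos (by norm_num), if_pos (by omega),
    show src + y + 1 - (src + 1) + 1 - 1 = y from by ring]
  simp only [one_mul, Int.ediv_one]

-- A's correction loop over (src, src+y] equals B's closed-form cross-of-5 test (for 0 ≤ y < 5).
lemma corr_loop (src x y : Int) (h0 : 0 ≤ y) (h4 : y < 5) :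
    (PySem.List.pyRange (src + 1) (src + y + 1) (if src + y > src then 1 else -1)).foldl
      (fun (p : Int × Int) i => if PySem.Int.mod i 5 == 0 then (p.1 + 1, p.2 + (-5)) else p) (x, y)
    = if (PySem.Int.floordiv src 5 + 1) * 5 ≤ src + y then (x + 1, y - 5) else (x, y) := by
  have h5 : (0:Int) < 5 := by norm_num
  rw [PySem.Int.floordiv_eq_ediv_of_pos h5]
  rcases (by omega : y = 0 ∨ y = 1 ∨ y = 2 ∨ y = 3 ∨ y = 4) with h|h|h|h|h <;> subst h
  · rw [if_neg (by omega), if_neg (by omega)]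
    simp [PySem.List.pyRange]
  all_goals {
    rw [if_pos (by omega), pyRange_window src _ (by omega)]
    norm_num [show Int.toNat 1 = 1 from rfl, show Int.toNat 2 = 2 from rfl,
      show Int.toNat 3 = 3 from rfl, show Int.toNat 4 = 4 from rfl,
      List.range_succ, PySem.Int.mod_eq_emod_of_pos h5]
    split_ifs <;> first | (exfalso; omega) | norm_num }

-- A's constant-append loop over range(abs(n)) produces the replicated block B builds directly.
lemma plan_fold (n cpos cneg : Int) (acc : List Int) :
    (PySem.List.pyRange 0 |n| 1).foldl
      (fun plan _ => if n > 0 then plan ++ [cpos] else plan ++ [cneg]) acc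
    = acc ++ (if n > 0 then List.replicate n.toNat cpos else List.replicate (-n).toNat cneg) := by
  by_cases hn : n > 0 <;> simp only [hn, if_true, if_false]
  · rw [abs_of_pos hn, ← Int.toNat_of_nonneg hn.le, PySem.List.pyRange_zero_natCast,
      PySem.List.foldl_append_singleton_eq_map (fun _ => cpos)]
    simp [Function.comp_def, List.map_const', show (max n 0).toNat = n.toNat from by omega]
  · rw [abs_of_nonpos (by omega), show -n = ((-n).toNat : Int) from by omega,
      PySem.List.pyRange_zero_natCast, PySem.List.foldl_append_singleton_eq_map (fun _ => cneg)]
    simp [Function.comp_def, List.map_const', show (max (-n) 0).toNat = (-n).toNat from by omega]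

-- ===== VERDICT (by name: the statement is the Claim_ definition above) =====
theorem truck_move_plan_spec : Claim_equal_truck_move_plan := by
  intro src dst _
  unfold Spec_truck_move_plan truck_move_plan truck_move_plan_alt
  simp only []
  rw [corr_loop src _ _ (PySem.Int.mod_nonneg _ (by norm_num)) (PySem.Int.mod_lt _ (by norm_num))]
  simp [plan_fold]
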